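-- pv_equiv track=rewrite | github.com/Igorok/algorithms-js | graph/1_3/11_source.py | getSourceDrain
-- ===== SOURCE A (Python) =====
-- def getSourceDrain(n, matrix):
--     source = 0
--     drain = 0
--
--     for i in range(n):
--         s = sum(matrix[j][i] for j in range(n))
--         if s == 0:
--             source += 1
--         d = sum(matrix[i][j] for j in range(n))
--         if d == 0:
--             drain += 1
--
--     return [source, drain]
-- ===== SOURCE B (Python) =====
-- def getSourceDrain(n, matrix):
--     col_sums = [0] * n
--     row_sums = []
--     for i in range(n):
--         row = matrix[i]
--         row_sums.append(sum(row[:n]))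
--         col_sums = [c + v for c, v in zip(col_sums, row)]
--     return [col_sums.count(0), row_sums.count(0)]
-- ===== Notes on version B (the rewrite author's own statement) =====
-- stated objective: alternative
-- what changed: B makes a single row-major pass that maintains a running column-sum vector (pointwise zip addition) and a list of row sums, then counts zeros in the two tables, instead of A's per-vertex inline column scan (matrix[j][i]) and row scan with inline counters.
import Mathlib
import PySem

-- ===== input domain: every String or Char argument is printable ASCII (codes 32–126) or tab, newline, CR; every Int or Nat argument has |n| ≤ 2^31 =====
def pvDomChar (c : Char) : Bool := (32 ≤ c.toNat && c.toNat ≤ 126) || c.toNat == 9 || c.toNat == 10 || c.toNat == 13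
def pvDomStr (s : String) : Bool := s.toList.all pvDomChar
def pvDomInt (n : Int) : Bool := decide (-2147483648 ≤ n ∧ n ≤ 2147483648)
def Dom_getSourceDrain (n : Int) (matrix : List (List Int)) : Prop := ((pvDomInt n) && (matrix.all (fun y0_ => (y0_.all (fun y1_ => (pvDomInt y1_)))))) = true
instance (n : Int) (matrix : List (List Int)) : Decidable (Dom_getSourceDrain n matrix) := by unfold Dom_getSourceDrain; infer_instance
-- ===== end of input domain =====

-- B builds the degree tables in one row-major pass (running column-sum vector + row-sum list)
-- and counts zeros afterwards, instead of A's per-vertex inline column/row scans; same O(n^2) cost.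

-- ===== PORT A =====
def getSourceDrain (n : Int) (matrix : List (List Int)) : List Int :=
  let res := (PySem.List.pyRange 0 n 1).foldl (fun (sd : Int × Int) i =>
    let s := (PySem.List.pyRange 0 n 1).foldl
      (fun acc j => acc + PySem.List.pyGetD (PySem.List.pyGetD matrix j []) i 0) 0
    let sd1 := if s = 0 then (sd.1 + 1, sd.2) else sd
    let d := (PySem.List.pyRange 0 n 1).foldl
      (fun acc j => acc + PySem.List.pyGetD (PySem.List.pyGetD matrix i []) j 0) 0
    if d = 0 then (sd1.1, sd1.2 + 1) else sd1) (0, 0)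
  [res.1, res.2]

-- ===== PORT B =====
def getSourceDrain_alt (n : Int) (matrix : List (List Int)) : List Int :=
  let st := (PySem.List.pyRange 0 n 1).foldl (fun (st : List Int × List Int) i =>
    let row := PySem.List.pyGetD matrix i []
    (List.zipWith (· + ·) st.1 row,
     st.2 ++ [(PySem.List.slice row none (some n)).sum]))
    (List.replicate n.toNat 0, ([] : List Int))
  [(st.1.count 0 : Int), (st.2.count 0 : Int)]

-- ===== PRECONDITION & SPEC =====
-- Pre_ excludes exactly the inputs where A raises IndexError: n exceeding the number of
-- rows, or one of the first n rows shorter than n.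
def Pre_getSourceDrain (n : Int) (matrix : List (List Int)) : Prop :=
  n ≤ matrix.length ∧ ∀ row ∈ matrix.take n.toNat, n ≤ (row.length : Int)
instance (n : Int) (matrix : List (List Int)) : Decidable (Pre_getSourceDrain n matrix) := by
  unfold Pre_getSourceDrain; infer_instance
def pvWitness_getSourceDrain : Int × List (List Int) := (2, [[0, 1], [1, 0]])

def Spec_getSourceDrain (n : Int) (matrix : List (List Int)) (out : List Int) : Prop := out = getSourceDrain_alt n matrix
instance (n : Int) (matrix : List (List Int)) (out : List Int) : Decidable (Spec_getSourceDrain n matrix out) := by unfold Spec_getSourceDrain; infer_instance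

-- ===== CLAIM (what is proved, stated in full; the proofs are below) =====
def Claim_equal_getSourceDrain : Prop := ∀ (n : Int) (matrix : List (List Int)), Dom_getSourceDrain n matrix → Pre_getSourceDrain n matrix → Spec_getSourceDrain n matrix (getSourceDrain n matrix)

-- ===== LEMMAS AND PROOFS =====

-- A's fold with the two inline counters is a pair of countPs.
theorem foldl_pair_count (s d : Int → Int) (l : List Int) (a b : Int) :
    l.foldl (fun sd i =>
      let sv := s i
      let sd1 := if sv = 0 then (sd.1 + 1, sd.2) else sd
      let dv := d i
      if dv = 0 then (sd1.1, sd1.2 + 1) else sd1) (a, b)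
    = (a + (l.countP (fun i => s i = 0) : Int), b + (l.countP (fun i => d i = 0) : Int)) := by
  induction l generalizing a b with
  | nil => simp
  | cons x xs ih =>
      simp only [List.foldl_cons, List.countP_cons]
      by_cases hs : s x = 0 <;> by_cases hd : d x = 0 <;>
        simp [hs, hd, ih] <;> omega

-- B's fold splits into the column fold and the appended row-sum list.
theorem foldl_pair_split {α ρ β γ : Type} (h : α → ρ) (f : β → ρ → β) (g : ρ → γ)
    (l : List α) (c : β) (r : List γ) :
    l.foldl (fun st x =>
      let row := h x
      (f st.1 row, st.2 ++ [g row])) (c, r)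
    = ((l.map h).foldl f c, r ++ (l.map h).map g) := by
  induction l generalizing c r with
  | nil => simp
  | cons x xs ih => simp [ih]

-- entries of the running column-sum vector
theorem foldl_zipWith_getD (rows : List (List Int)) (cs : List Int)
    (h : ∀ row ∈ rows, cs.length ≤ row.length) :
    (rows.foldl (fun c r => List.zipWith (· + ·) c r) cs).length = cs.length ∧
    ∀ k, k < cs.length → (rows.foldl (fun c r => List.zipWith (· + ·) c r) cs).getD k 0
          = cs.getD k 0 + (rows.map (fun r => r.getD k 0)).sum := by
  induction rows generalizing cs with
  | nil => simp
  | cons row rows ih =>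
      have hlen : (List.zipWith (· + ·) cs row).length = cs.length := by
        have := h row (by simp)
        simp [List.length_zipWith]; omega
      have hrest : ∀ r ∈ rows, (List.zipWith (· + ·) cs row).length ≤ r.length := by
        intro r hr; rw [hlen]; exact h r (by simp [hr])
      obtain ⟨ihlen, ihget⟩ := ih _ hrest
      refine ⟨by simp [List.foldl_cons, ihlen, hlen], ?_⟩
      intro k hk
      rw [List.foldl_cons, ihget k (by rw [hlen]; exact hk)]
      have hkr : k < row.length := lt_of_lt_of_le hk (h row (by simp))
      have hz : (List.zipWith (· + ·) cs row).getD k 0 = cs.getD k 0 + row.getD k 0 := by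
        simp [List.getD, List.getElem?_zipWith, List.getElem?_eq_getElem hk,
              List.getElem?_eq_getElem hkr]
      rw [hz]; simp; ring
  
-- range-map extensionality: a list of length m equals the map of its getD over range m
theorem eq_map_range_getD (l : List Int) (m : Nat) (h : l.length = m) :
    l = (List.range m).map (fun k => l.getD k 0) := by
  apply List.ext_getElem
  · simp [h]
  · intro i h1 h2
    simp at h2
    simp [List.getD, List.getElem?_eq_getElem (by omega : i < l.length)]

theorem count_map_range (m : Nat) (f : Nat → Int) :
    (((List.range m).map f).count 0 : Int) = ((List.range m).countP (fun k => f k = 0) : Int) := by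
  rw [List.count_eq_countP, List.countP_map]
  norm_num [Function.comp_def, eq_comm]
  congr 1

-- prefix rows selected by the loop
theorem map_getD_range_take {α : Type} [Inhabited α] (l : List α) (m : Nat) (h : m ≤ l.length) (d : α) :
    (List.range m).map (fun k => l.getD k d) = l.take m := by
  apply List.ext_getElem
  · simp [h]
  · intro i h1 h2
    simp at h1
    simp [List.getD, List.getElem?_eq_getElem (by omega : i < l.length)]

theorem getSourceDrain_spec : Claim_equal_getSourceDrain := by
  intro n matrix _ hpre
  obtain ⟨hn, hrows⟩ := hpre
  unfold Spec_getSourceDrain getSourceDrain getSourceDrain_alt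
  rcases Int.lt_or_le n 0 with hneg | hpos
  · rw [PySem.List.pyRange_one_eq_nil (by omega)]
    have : n.toNat = 0 := by omega
    simp [this]
  set m := n.toNat with hm
  have hml : m ≤ matrix.length := by omega
  have hrow : ∀ row ∈ matrix.take m, m ≤ row.length := by
    intro row hr; have := hrows row hr; omega
  have hrange : PySem.List.pyRange 0 n 1 = (List.range m).map (fun (k : Nat) => (k : Int)) := by
    rw [PySem.List.pyRange_one]
    have h0 : (n - 0).toNat = m := by omega
    rw [h0]
    exact List.map_congr_left (fun k _ => by omega)
  rw [hrange]
  rw [foldl_pair_count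
        (fun i => ((List.range m).map (fun (k : Nat) => (k : Int))).foldl
          (fun acc j => acc + PySem.List.pyGetD (PySem.List.pyGetD matrix j []) i 0) 0)
        (fun i => ((List.range m).map (fun (k : Nat) => (k : Int))).foldl
          (fun acc j => acc + PySem.List.pyGetD (PySem.List.pyGetD matrix i []) j 0) 0)]
  rw [foldl_pair_split
        (fun i => PySem.List.pyGetD matrix i [])
        (fun c r => List.zipWith (· + ·) c r)
        (fun row => (PySem.List.slice row none (some n)).sum)]
  have hmaprows : ((List.range m).map (fun (k : Nat) => (k : Int))).map
      (fun i => PySem.List.pyGetD matrix i []) = matrix.take m := by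
    rw [List.map_map]
    have hc : ((fun i => PySem.List.pyGetD matrix i []) ∘ fun (k : Nat) => (k : Int))
        = fun k => matrix.getD k [] := by
      funext k; simp [PySem.List.pyGetD_natCast]
    rw [hc, map_getD_range_take _ _ hml]
  rw [hmaprows]
  obtain ⟨hclen, hcget⟩ := foldl_zipWith_getD (matrix.take m) (List.replicate m 0)
      (by intro r hr; simpa using hrow r hr)
  rw [List.length_replicate] at hclen hcget
  dsimp only
  simp only [List.nil_append, zero_add, List.cons.injEq, and_true]
  constructor
  · -- source counts
    rw [eq_map_range_getD _ m hclen, count_map_range, List.countP_map]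
    congr 1
    apply List.countP_congr
    intro k hk
    have hkm : k < m := List.mem_range.mp hk
    simp only [Function.comp_def]
    have hS : ((List.range m).map (fun (j : Nat) => (j : Int))).foldl
        (fun acc j => acc + PySem.List.pyGetD (PySem.List.pyGetD matrix j []) (k : Int) 0) 0
        = ((matrix.take m).map (fun r => r.getD k 0)).sum := by
      rw [PySem.List.foldl_add, List.map_map]
      have hc2 : ((fun j => PySem.List.pyGetD (PySem.List.pyGetD matrix j []) (k : Int) 0)
          ∘ fun (j : Nat) => (j : Int)) = (fun r => r.getD k 0) ∘ (fun j => matrix.getD j []) := by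
        funext j; simp [PySem.List.pyGetD_natCast]
      rw [hc2, ← List.map_map, map_getD_range_take matrix m hml, zero_add]
    rw [hS, hcget k hkm]
    simp
  · -- drain counts
    rw [List.count_eq_countP, List.countP_map, List.countP_map,
        ← map_getD_range_take matrix m hml ([] : List Int), List.countP_map]
    congr 1
    apply List.countP_congr
    intro k hk
    have hkm : k < m := List.mem_range.mp hk
    have hkl : k < matrix.length := lt_of_lt_of_le hkm hml
    have hmemk : matrix.getD k [] ∈ matrix.take m := by
      have hgd : matrix.getD k [] = matrix[k] := by
        simp [List.getD, List.getElem?_eq_getElem hkl]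
      have hkt : k < (matrix.take m).length := by simp; omega
      have : (matrix.take m)[k] = matrix[k] := List.getElem_take
      rw [hgd, ← this]
      exact List.getElem_mem hkt
    have hrl : m ≤ (matrix.getD k []).length := hrow _ hmemk
    have hD : ((List.range m).map (fun (j : Nat) => (j : Int))).foldl
        (fun acc j => acc + PySem.List.pyGetD (PySem.List.pyGetD matrix (k : Int) []) j 0) 0
        = ((matrix.getD k []).take m).sum := by
      rw [PySem.List.foldl_add, List.map_map]
      have hc3 : ((fun j => PySem.List.pyGetD (PySem.List.pyGetD matrix (k : Int) []) j 0)
          ∘ fun (j : Nat) => (j : Int)) = fun j => (matrix.getD k []).getD j 0 := by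
        funext j; simp [PySem.List.pyGetD_natCast]
      rw [hc3, map_getD_range_take _ m hrl, zero_add]
    simp only [Function.comp_def, hD, PySem.List.slice_to _ hpos, ← hm]
    simp only [decide_eq_true_eq, beq_iff_eq]
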